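-- pv_equiv track=rewrite | github.com/maglkp/leetcode | dp_multi/longestPalindrome.py | expandAroundPivot
-- ===== SOURCE A (Python) =====
-- def expandAroundPivot(left: int, right: int, s: str) -> int:
--     if right > len(s) - 1:
--         return 0
--     if s[left] != s[right]:
--         return 0
--     while left > 0 and right < len(s) - 1 and s[left - 1] == s[right + 1]:
--         left -= 1
--         right += 1
--     return right - left + 1
-- ===== SOURCE B (Python) =====
-- def expandAroundPivot(left: int, right: int, s: str) -> int:
--     if right > len(s) - 1:
--         return 0
--     if s[left] != s[right]:
--         return 0
--     k = 0
--     for a, b in zip(reversed(s[:left]), s[right + 1:]):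
--         if a != b:
--             break
--         k += 1
--     return right - left + 1 + 2 * k
-- ===== Notes on version B (the rewrite author's own statement) =====
-- stated objective: alternative
-- what changed: Replaces the index-mutating while loop with a slice-based scan: the number of extra matched pairs is the common-prefix length of reversed(s[:left]) and s[right+1:], and the result is right-left+1+2k.
-- outside the precondition, e.g. on expandAroundPivot(-1, -1, 'aa'): A returns 1, B returns 3; on expandAroundPivot(5, 0, 'aa'): A raises IndexError, B raises IndexError
import Mathlib
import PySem

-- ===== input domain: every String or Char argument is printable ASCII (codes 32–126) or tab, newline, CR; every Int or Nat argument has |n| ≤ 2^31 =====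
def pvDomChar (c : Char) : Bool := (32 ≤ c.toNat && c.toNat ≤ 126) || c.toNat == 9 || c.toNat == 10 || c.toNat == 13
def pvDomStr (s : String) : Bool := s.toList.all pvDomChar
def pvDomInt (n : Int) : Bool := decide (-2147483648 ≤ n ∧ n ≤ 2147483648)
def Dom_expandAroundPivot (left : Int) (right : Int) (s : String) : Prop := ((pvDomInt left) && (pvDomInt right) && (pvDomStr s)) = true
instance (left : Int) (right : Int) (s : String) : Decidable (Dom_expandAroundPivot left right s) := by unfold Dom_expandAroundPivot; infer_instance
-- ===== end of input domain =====

-- B replaces A's index-mutating while loop by a common-prefix count over the two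
-- slices reversed(s[:left]) and s[right+1:]; same cost, different decomposition.


-- ===== PORT A =====
-- the while loop of A: mutates (left, right) until a bound or a mismatch stops it
def pvALoop (cs : List Char) (left right : Int) : Int × Int :=
  if 0 < left ∧ right < (cs.length : Int) - 1 ∧
      PySem.List.pyGet? cs (left - 1) = PySem.List.pyGet? cs (right + 1) then
    pvALoop cs (left - 1) (right + 1)
  else (left, right)
termination_by left.toNat
decreasing_by omega

def expandAroundPivot (left : Int) (right : Int) (s : String) : Int :=
  let cs := s.toList
  if right > (cs.length : Int) - 1 then 0
  else if PySem.List.pyGet? cs left ≠ PySem.List.pyGet? cs right then 0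
  else
    let p := pvALoop cs left right
    p.2 - p.1 + 1

-- ===== PORT B =====
-- Source B's counting loop: length of the matching common prefix of two char lists
def pvZipCount : List Char → List Char → Nat
  | a :: as, b :: bs => if a = b then pvZipCount as bs + 1 else 0
  | _, _ => 0

def expandAroundPivot_alt (left : Int) (right : Int) (s : String) : Int :=
  let cs := s.toList
  if right > (cs.length : Int) - 1 then 0
  else if PySem.List.pyGet? cs left ≠ PySem.List.pyGet? cs right then 0
  else
    let k := pvZipCount (PySem.List.slice cs none (some left)).reverse
                        (PySem.List.slice cs (some (right + 1)) none)
    right - left + 1 + 2 * (k : Int)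

-- ===== PRECONDITION & SPEC =====
-- Pre_ excludes inputs (with right in range) whose left or right index is negative or
-- outside [-len, len): there A either raises IndexError or resolves the index by
-- Python's negative-index wraparound, which is outside the natural domain of
-- expanding a palindrome around a non-negative center.
def Pre_expandAroundPivot (left : Int) (right : Int) (s : String) : Prop :=
  right > (s.toList.length : Int) - 1 ∨
    (0 ≤ left ∧ left < (s.toList.length : Int) ∧ 0 ≤ right)
instance (left : Int) (right : Int) (s : String) : Decidable (Pre_expandAroundPivot left right s) := by unfold Pre_expandAroundPivot; infer_instance

def pvWitness_expandAroundPivot : Int × Int × String := (1, 1, "aba")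

def Spec_expandAroundPivot (left : Int) (right : Int) (s : String) (out : Int) : Prop := out = expandAroundPivot_alt left right s
instance (left : Int) (right : Int) (s : String) (out : Int) : Decidable (Spec_expandAroundPivot left right s out) := by unfold Spec_expandAroundPivot; infer_instance

-- ===== CLAIM (what is proved, stated in full; the proofs are below) =====
def Claim_equal_expandAroundPivot : Prop := ∀ (left : Int) (right : Int) (s : String), Dom_expandAroundPivot left right s → Pre_expandAroundPivot left right s → Spec_expandAroundPivot left right s (expandAroundPivot left right s)

-- ===== LEMMAS AND PROOFS =====

theorem pvZipCount_nil_right (a : List Char) : pvZipCount a [] = 0 := by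
  cases a <;> rfl

-- the loop of A and the prefix count of B compute the same expansion width
theorem pvALoop_eq_zipCount (cs : List Char) (l r : Nat) (hl : l ≤ cs.length)
    (hr : r < cs.length) :
    (pvALoop cs (l : Int) (r : Int)).2 - (pvALoop cs (l : Int) (r : Int)).1 =
      (r : Int) - (l : Int) +
        2 * (pvZipCount ((cs.take l).reverse) (cs.drop (r + 1)) : Int) := by
  induction l generalizing r with
  | zero =>
      rw [pvALoop]
      simp
  | succ l ih =>
      rw [pvALoop]
      have h1 : ((l + 1 : Nat) : Int) - 1 = (l : Int) := by push_cast; ring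
      have h2 : ((r : Nat) : Int) + 1 = ((r + 1 : Nat) : Int) := by push_cast; ring
      by_cases hG : (r : Int) < (cs.length : Int) - 1 ∧
          PySem.List.pyGet? cs (((l + 1 : Nat) : Int) - 1) =
            PySem.List.pyGet? cs (((r : Nat) : Int) + 1)
      · obtain ⟨hb, he⟩ := hG
        have hr1 : r + 1 < cs.length := by exact_mod_cast (by omega : (r : Int) + 1 < (cs.length : Int))
        have hl' : l < cs.length := by omega
        rw [if_pos ⟨by positivity, hb, he⟩, h1, h2]
        rw [ih (r + 1) (by omega) hr1]
        -- identify the matched pair of characters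
        rw [h1, h2] at he
        simp only [PySem.List.pyGet?_natCast] at he
        rw [List.getElem?_eq_getElem hl', List.getElem?_eq_getElem hr1] at he
        have hc : cs[l] = cs[r + 1] := by exact Option.some.inj he
        have htake : cs.take (l + 1) = cs.take l ++ [cs[l]] := by
          rw [List.take_succ, List.getElem?_eq_getElem hl']
          rfl
        have hdrop : cs.drop (r + 1) = cs[r + 1] :: cs.drop (r + 2) := by
          rw [List.drop_eq_getElem_cons hr1]
        rw [htake, hdrop, List.reverse_append]
        simp only [List.reverse_singleton, List.singleton_append, pvZipCount,
          if_pos hc]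
        push_cast
        ring
      · rw [if_neg (by
          intro h
          exact hG ⟨h.2.1, h.2.2⟩)]
        by_cases hb : (r : Int) < (cs.length : Int) - 1
        · -- characters differ
          have he : PySem.List.pyGet? cs (((l + 1 : Nat) : Int) - 1) ≠
              PySem.List.pyGet? cs (((r : Nat) : Int) + 1) := fun h => hG ⟨hb, h⟩
          have hr1 : r + 1 < cs.length := by exact_mod_cast (by omega : (r : Int) + 1 < (cs.length : Int))
          have hl' : l < cs.length := by omega
          rw [h1, h2] at he
          simp only [PySem.List.pyGet?_natCast] at he
          rw [List.getElem?_eq_getElem hl', List.getElem?_eq_getElem hr1] at he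
          have hc : cs[l] ≠ cs[r + 1] := fun h => he (by rw [h])
          have htake : cs.take (l + 1) = cs.take l ++ [cs[l]] := by
            rw [List.take_succ, List.getElem?_eq_getElem hl']
            rfl
          have hdrop : cs.drop (r + 1) = cs[r + 1] :: cs.drop (r + 2) := by
            rw [List.drop_eq_getElem_cons hr1]
          rw [htake, hdrop, List.reverse_append]
          simp only [List.reverse_singleton, List.singleton_append, pvZipCount,
            if_neg hc]
          push_cast
          ring
        · -- right hit the end: the dropped slice is empty
          have : cs.drop (r + 1) = [] := by
            apply List.drop_eq_nil_of_le
            omega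
          rw [this, pvZipCount_nil_right]
          push_cast
          ring

-- ===== VERDICT (by name: the statement is the Claim_ definition above) =====
theorem expandAroundPivot_spec : Claim_equal_expandAroundPivot := by
  intro left right s _ hpre
  unfold Spec_expandAroundPivot expandAroundPivot expandAroundPivot_alt
  set cs := s.toList with hcs
  by_cases h1 : right > (cs.length : Int) - 1
  · simp [h1]
  · simp only [if_neg h1]
    have hP : 0 ≤ left ∧ left < (cs.length : Int) ∧ 0 ≤ right := by
      rcases hpre with h | h
      · exact absurd h h1
      · exact h
    obtain ⟨hl0, hln, hr0⟩ := hP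
    by_cases h2 : PySem.List.pyGet? cs left ≠ PySem.List.pyGet? cs right
    · simp [h2]
    · simp only [if_neg h2]
      obtain ⟨lN, rfl⟩ := Int.eq_ofNat_of_zero_le hl0
      obtain ⟨rN, rfl⟩ := Int.eq_ofNat_of_zero_le hr0
      have hlen : lN ≤ cs.length := by omega
      have hrlen : rN < cs.length := by omega
      have hcast : ((rN : Int) + 1) = ((rN + 1 : Nat) : Int) := by push_cast; ring
      rw [hcast, PySem.List.slice_to_natCast, PySem.List.slice_from_natCast,
        pvALoop_eq_zipCount cs lN rN hlen hrlen]
      ring
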